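-- pv_equiv track=rewrite | github.com/Monguztb/darts_counter | dartscounter.py | get_optimal_throws
-- ===== SOURCE A (Python) =====
-- def get_optimal_throws(target):
--     # Valid doubles on a standard dartboard
--     valid_doubles = [2 * i for i in range(1, 21)]
--
--     for dart1 in range(1, 21):
--         for dart2 in range(1, 21):
--             for double in valid_doubles:
--                 if dart1 * 3 + dart2 * 3 + double == target:
--                     return [f"triple {dart1}", f"triple {dart2}", f"double {double}"]
--
--     return []
-- ===== SOURCE B (Python) =====
-- def get_optimal_throws(target):
--     for dart1 in range(1, 21):
--         for dart2 in range(1, 21):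
--             needed = target - 3 * dart1 - 3 * dart2
--             if needed % 2 == 0 and 2 <= needed <= 40:
--                 return [f"triple {dart1}", f"triple {dart2}", f"double {needed}"]
--     return []
-- ===== Notes on version B (the rewrite author's own statement) =====
-- stated objective: simpler
-- what changed: The innermost scan over the list of valid doubles is replaced by computing the single required double from target and the two triples, checking directly that it is even and within the board's double range.
import Mathlib
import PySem

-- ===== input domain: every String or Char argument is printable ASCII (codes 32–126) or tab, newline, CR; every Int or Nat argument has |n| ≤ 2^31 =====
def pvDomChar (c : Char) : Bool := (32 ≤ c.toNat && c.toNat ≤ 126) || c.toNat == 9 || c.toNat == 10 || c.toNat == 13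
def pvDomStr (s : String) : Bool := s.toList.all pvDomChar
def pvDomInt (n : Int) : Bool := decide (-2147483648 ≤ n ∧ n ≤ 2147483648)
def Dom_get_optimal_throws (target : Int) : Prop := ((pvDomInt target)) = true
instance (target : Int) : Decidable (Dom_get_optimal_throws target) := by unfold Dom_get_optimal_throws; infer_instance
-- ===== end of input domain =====

-- B replaces A's innermost scan over the list of valid doubles by a direct
-- arithmetic check of the single required double (objective: simpler).

-- ===== PORT A =====
-- innermost loop: 'for double in valid_doubles: if …: return …'
def pyA_inner (target dart1 dart2 : Int) : List Int → Option (List String)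
  | [] => none
  | d :: rest =>
    if dart1 * 3 + dart2 * 3 + d = target then
      some ["triple " ++ PySem.Int.toStr dart1, "triple " ++ PySem.Int.toStr dart2,
            "double " ++ PySem.Int.toStr d]
    else pyA_inner target dart1 dart2 rest

-- 'for dart2 in range(1, 21): …'
def pyA_loop2 (target dart1 : Int) (doubles : List Int) : List Int → Option (List String)
  | [] => none
  | d2 :: rest =>
    match pyA_inner target dart1 d2 doubles with
    | some r => some r
    | none => pyA_loop2 target dart1 doubles rest

-- 'for dart1 in range(1, 21): …'
def pyA_loop1 (target : Int) (doubles : List Int) : List Int → Option (List String)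
  | [] => none
  | d1 :: rest =>
    match pyA_loop2 target d1 doubles (PySem.List.pyRange 1 21 1) with
    | some r => some r
    | none => pyA_loop1 target doubles rest

def get_optimal_throws (target : Int) : List String :=
  let valid_doubles := (PySem.List.pyRange 1 21 1).map (fun i => 2 * i)
  (pyA_loop1 target valid_doubles (PySem.List.pyRange 1 21 1)).getD []

-- ===== PORT B =====
def pyB_loop2 (target dart1 : Int) : List Int → Option (List String)
  | [] => none
  | d2 :: rest =>
    let needed := target - 3 * dart1 - 3 * d2
    if PySem.Int.mod needed 2 = 0 ∧ 2 ≤ needed ∧ needed ≤ 40 then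
      some ["triple " ++ PySem.Int.toStr dart1, "triple " ++ PySem.Int.toStr d2,
            "double " ++ PySem.Int.toStr needed]
    else pyB_loop2 target dart1 rest

def pyB_loop1 (target : Int) : List Int → Option (List String)
  | [] => none
  | d1 :: rest =>
    match pyB_loop2 target d1 (PySem.List.pyRange 1 21 1) with
    | some r => some r
    | none => pyB_loop1 target rest

def get_optimal_throws_alt (target : Int) : List String :=
  (pyB_loop1 target (PySem.List.pyRange 1 21 1)).getD []

-- ===== PRECONDITION & SPEC =====
def Spec_get_optimal_throws (target : Int) (out : List String) : Prop := out = get_optimal_throws_alt target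
instance (target : Int) (out : List String) : Decidable (Spec_get_optimal_throws target out) := by unfold Spec_get_optimal_throws; infer_instance

-- ===== CLAIM (what is proved, stated in full; the proofs are below) =====
def Claim_equal_get_optimal_throws : Prop := ∀ (target : Int), Dom_get_optimal_throws target → Spec_get_optimal_throws target (get_optimal_throws target)

-- ===== LEMMAS AND PROOFS =====

-- A's innermost scan over a list in which every element equals (target-3a-3b) iff
-- the branch fires, characterised by membership.
lemma pyA_inner_char (t a b : Int) (ds : List Int) :
    pyA_inner t a b ds =
      (if (t - 3 * a - 3 * b) ∈ ds then
        some ["triple " ++ PySem.Int.toStr a, "triple " ++ PySem.Int.toStr b,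
              "double " ++ PySem.Int.toStr (t - 3 * a - 3 * b)]
      else none) := by
  induction ds with
  | nil => simp [pyA_inner]
  | cons d rest ih =>
    by_cases h : a * 3 + b * 3 + d = t
    · have hd : t - 3 * a - 3 * b = d := by omega
      simp [pyA_inner, h, hd]
    · have hd : t - 3 * a - 3 * b ≠ d := by omega
      simp [pyA_inner, h, ih, hd]

-- membership in the literal list of doubles is evenness plus the range
lemma mem_doubles (n : Int) :
    (n ∈ (PySem.List.pyRange 1 21 1).map (fun i => 2 * i)) ↔
      (PySem.Int.mod n 2 = 0 ∧ 2 ≤ n ∧ n ≤ 40) := by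
  rw [PySem.Int.mod_eq_emod_of_pos (by norm_num)]
  simp only [List.mem_map, PySem.List.mem_pyRange_one]
  constructor
  · rintro ⟨i, ⟨h1, h2⟩, rfl⟩; omega
  · rintro ⟨h1, h2, h3⟩; exact ⟨n / 2, by omega, by omega⟩

lemma inner_eq_B_body (t a b : Int) :
    pyA_inner t a b ((PySem.List.pyRange 1 21 1).map (fun i => 2 * i)) =
      (if PySem.Int.mod (t - 3 * a - 3 * b) 2 = 0 ∧ 2 ≤ t - 3 * a - 3 * b ∧ t - 3 * a - 3 * b ≤ 40 then
        some ["triple " ++ PySem.Int.toStr a, "triple " ++ PySem.Int.toStr b,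
              "double " ++ PySem.Int.toStr (t - 3 * a - 3 * b)]
      else none) := by
  rw [pyA_inner_char]
  by_cases h : PySem.Int.mod (t - 3 * a - 3 * b) 2 = 0 ∧ 2 ≤ t - 3 * a - 3 * b ∧ t - 3 * a - 3 * b ≤ 40
  · rw [if_pos ((mem_doubles _).mpr h), if_pos h]
  · rw [if_neg (fun hm => h ((mem_doubles _).mp hm)), if_neg h]

lemma loop2_eq (t a : Int) (l : List Int) :
    pyA_loop2 t a ((PySem.List.pyRange 1 21 1).map (fun i => 2 * i)) l = pyB_loop2 t a l := by
  induction l with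
  | nil => rfl
  | cons d2 rest ih =>
    simp only [pyA_loop2, pyB_loop2, inner_eq_B_body, ih]
    split_ifs <;> rfl

lemma loop1_eq (t : Int) (l : List Int) :
    pyA_loop1 t ((PySem.List.pyRange 1 21 1).map (fun i => 2 * i)) l = pyB_loop1 t l := by
  induction l with
  | nil => rfl
  | cons d1 rest ih =>
    simp only [pyA_loop1, pyB_loop1, loop2_eq, ih]

-- ===== VERDICT (by name: the statement is the Claim_ definition above) =====
theorem get_optimal_throws_spec : Claim_equal_get_optimal_throws := by
  intro target _
  unfold Spec_get_optimal_throws get_optimal_throws get_optimal_throws_alt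
  simp only [loop1_eq]
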